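-- pv_equiv track=rewrite | github.com/hoareaualexis/DronePathOpt | polygon_decomposition.py | redondance_del
-- ===== SOURCE A (Python) =====
-- def redondance_del(total_convex):
--     new_list, new_list1 = [], []
--
--     for elt in total_convex:
--         new_list.append(set(elt))
--
--     for elt in new_list:
--         if not elt in new_list1:
--             if len(elt) > 2:
--                 new_list1.append(elt)
--
--     new_list = []
--     for elt in new_list1:
--         for ls in total_convex:
--             if elt == set(ls):
--                 new_list.append(ls)
--                 break
--
--     return new_list
-- ===== SOURCE B (Python) =====
-- def redondance_del(total_convex):
--     seen, result = [], []
--     for elt in total_convex: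
--         s = set(elt)
--         if len(s) > 2 and s not in seen:
--             seen.append(s)
--             result.append(elt)
--     return result
-- ===== Notes on version B (the rewrite author's own statement) =====
-- stated objective: faster
-- what changed: A's three passes (build all sets, dedup them by set-equality keeping len>2, then re-scan the whole of total_convex per kept set to recover the first matching sublist) are replaced by a single pass that keeps each sublist whose element-set is new and has more than 2 elements, maintaining a seen list of kept sets; the per-kept-set rescan disappears.
import Mathlib
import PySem

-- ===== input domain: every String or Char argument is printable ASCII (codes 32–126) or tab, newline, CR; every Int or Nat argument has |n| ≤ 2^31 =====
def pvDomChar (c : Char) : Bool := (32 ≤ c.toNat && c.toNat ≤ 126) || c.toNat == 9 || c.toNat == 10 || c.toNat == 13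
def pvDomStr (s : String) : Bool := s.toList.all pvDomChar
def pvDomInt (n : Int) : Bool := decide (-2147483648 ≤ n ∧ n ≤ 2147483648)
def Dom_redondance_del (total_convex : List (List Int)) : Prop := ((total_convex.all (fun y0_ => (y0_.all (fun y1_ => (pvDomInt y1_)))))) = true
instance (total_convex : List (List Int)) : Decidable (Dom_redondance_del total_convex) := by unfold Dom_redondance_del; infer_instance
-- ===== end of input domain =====

-- B replaces A's three passes (build sets, dedup them, re-scan the input per kept set) by one pass
-- that keeps each first sublist whose element-set is new and has more than 2 elements: simpler.

-- ===== PORT A =====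
def redondance_del (total_convex : List (List Int)) : List (List Int) :=
  -- new_list = [set(elt) for elt in total_convex]
  let new_list := total_convex.map (fun elt => PySem.Set.ofList elt)
  -- second loop: dedup (by set equality) keeping only sets with more than 2 elements
  let new_list1 := new_list.foldl (fun acc elt =>
    if acc.any (fun t => PySem.Set.equal elt t) then acc
    else if 2 < PySem.Set.len elt then acc ++ [elt] else acc) []
  -- third loop: for each kept set, the first list of total_convex with that set (break = find?)
  new_list1.foldl (fun acc elt =>
    match total_convex.find? (fun ls => PySem.Set.equal elt (PySem.Set.ofList ls)) with
    | some ls => acc ++ [ls]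
    | none => acc) []

-- ===== PORT B =====
def redondance_del_alt (total_convex : List (List Int)) : List (List Int) :=
  (total_convex.foldl (fun p elt =>
      let s := PySem.Set.ofList elt
      if 2 < PySem.Set.len s ∧ (p.1.any (fun t => PySem.Set.equal s t)) = false then
        (p.1 ++ [s], p.2 ++ [elt])
      else p)
    ([], [])).2

-- ===== PRECONDITION & SPEC =====
def Spec_redondance_del (total_convex : List (List Int)) (out : List (List Int)) : Prop := out = redondance_del_alt total_convex
instance (total_convex : List (List Int)) (out : List (List Int)) : Decidable (Spec_redondance_del total_convex out) := by unfold Spec_redondance_del; infer_instance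

-- ===== CLAIM (what is proved, stated in full; the proofs are below) =====
def Claim_equal_redondance_del : Prop := ∀ (total_convex : List (List Int)), Dom_redondance_del total_convex → Spec_redondance_del total_convex (redondance_del total_convex)

-- ===== LEMMAS AND PROOFS =====

-- the common specification: keep e iff its set has > 2 elements and no element of the prefix `pre`
-- (all earlier sublists, kept or not) has an equal set
def keepSpec (pre : List (List Int)) : List (List Int) → List (List Int)
  | [] => []
  | e :: t =>
    if 2 < PySem.Set.len (PySem.Set.ofList e) ∧
        ∀ x ∈ pre, ¬ PySem.Set.equal (PySem.Set.ofList e) (PySem.Set.ofList x) = true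
    then e :: keepSpec (pre ++ [e]) t
    else keepSpec (pre ++ [e]) t

lemma E_refl (s : PySem.Set Int) : PySem.Set.equal s s = true :=
  (PySem.Set.equal_iff s s).mpr (fun _ => Iff.rfl)

lemma E_trans {a b c : PySem.Set Int} (h1 : PySem.Set.equal a b = true)
    (h2 : PySem.Set.equal b c = true) : PySem.Set.equal a c = true := by
  rw [PySem.Set.equal_iff] at *
  exact fun x => (h1 x).trans (h2 x)

lemma E_len {a b : List Int} (h : PySem.Set.equal (PySem.Set.ofList a) (PySem.Set.ofList b) = true) :
    PySem.Set.len (PySem.Set.ofList a) = PySem.Set.len (PySem.Set.ofList b) := by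
  rw [PySem.Set.equal_iff] at h
  have hp : (PySem.Set.ofList a).Perm (PySem.Set.ofList b) :=
    (List.perm_ext_iff_of_nodup (PySem.Set.nodup_ofList a) (PySem.Set.nodup_ofList b)).mpr h
  simp [PySem.Set.len, hp.length_eq]

-- the invariant tying a "seen" accumulator (only kept sets) to the full prefix of inputs
def SeenInv (seen : List (PySem.Set Int)) (pre : List (List Int)) : Prop :=
  ∀ s : PySem.Set Int, (∃ t ∈ seen, PySem.Set.equal s t = true) ↔
    (∃ x ∈ pre, PySem.Set.equal s (PySem.Set.ofList x) = true ∧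
      2 < PySem.Set.len (PySem.Set.ofList x))

lemma inv_nil : SeenInv [] [] := by intro s; simp

-- case analysis of one step, shared by both ports
lemma inv_step_kept {seen pre} (e : List Int) (hI : SeenInv seen pre)
    (h2 : 2 < PySem.Set.len (PySem.Set.ofList e)) :
    SeenInv (seen ++ [PySem.Set.ofList e]) (pre ++ [e]) := by
  intro s
  constructor
  · rintro ⟨t, ht, hst⟩
    rcases List.mem_append.mp ht with h | h
    · obtain ⟨x, hx, hsx⟩ := (hI s).mp ⟨t, h, hst⟩
      exact ⟨x, List.mem_append.mpr (Or.inl hx), hsx⟩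
    · simp at h; subst h
      exact ⟨e, List.mem_append.mpr (Or.inr (by simp)), hst, h2⟩
  · rintro ⟨x, hx, hsx, hlx⟩
    rcases List.mem_append.mp hx with h | h
    · obtain ⟨t, ht, hst⟩ := (hI s).mpr ⟨x, h, hsx, hlx⟩
      exact ⟨t, List.mem_append.mpr (Or.inl ht), hst⟩
    · simp at h; subst h
      exact ⟨PySem.Set.ofList x, List.mem_append.mpr (Or.inr (by simp)), hsx⟩

lemma inv_step_skip {seen pre} (e : List Int) (hI : SeenInv seen pre)
    (h : ¬ (2 < PySem.Set.len (PySem.Set.ofList e) ∧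
        (seen.any (fun t => PySem.Set.equal (PySem.Set.ofList e) t)) = false)) :
    SeenInv seen (pre ++ [e]) := by
  intro s
  rw [hI s]
  constructor
  · rintro ⟨x, hx, hsx⟩
    exact ⟨x, List.mem_append.mpr (Or.inl hx), hsx⟩
  · rintro ⟨x, hx, hsx, hlx⟩
    rcases List.mem_append.mp hx with hm | hm
    · exact ⟨x, hm, hsx, hlx⟩
    · simp at hm; subst hm
      -- s equals set(e) which has > 2 elements, so `seen` must contain an equal set
      cases hb : seen.any (fun t => PySem.Set.equal (PySem.Set.ofList x) t) with
      | false => exact absurd ⟨hlx, hb⟩ h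
      | true =>
        obtain ⟨t, ht, het⟩ := List.any_eq_true.mp hb
        exact (hI s).mp ⟨t, ht, E_trans hsx het⟩

-- equivalence of the kept-condition under the invariant
lemma cond_iff {seen pre} (e : List Int) (hI : SeenInv seen pre) :
    (2 < PySem.Set.len (PySem.Set.ofList e) ∧
      (seen.any (fun t => PySem.Set.equal (PySem.Set.ofList e) t)) = false) ↔
    (2 < PySem.Set.len (PySem.Set.ofList e) ∧
      ∀ x ∈ pre, ¬ PySem.Set.equal (PySem.Set.ofList e) (PySem.Set.ofList x) = true) := by
  constructor
  · rintro ⟨h2, hany⟩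
    refine ⟨h2, fun x hx hex => ?_⟩
    have hlx : 2 < PySem.Set.len (PySem.Set.ofList x) := E_len hex ▸ h2
    obtain ⟨t, ht, hst⟩ := (hI _).mpr ⟨x, hx, hex, hlx⟩
    have : seen.any (fun t => PySem.Set.equal (PySem.Set.ofList e) t) = true :=
      List.any_eq_true.mpr ⟨t, ht, hst⟩
    simp [this] at hany
  · rintro ⟨h2, hall⟩
    refine ⟨h2, ?_⟩
    by_contra hc
    obtain ⟨t, ht, hst⟩ := List.any_eq_true.mp (Bool.not_eq_false _ |>.mp hc)
    obtain ⟨x, hx, hex, _⟩ := (hI _).mp ⟨t, ht, hst⟩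
    exact hall x hx hex

-- B's single pass computes keepSpec (and its seen-list is the kept sets)
lemma B_fold (l : List (List Int)) : ∀ pre seen res, SeenInv seen pre →
    l.foldl (fun p elt =>
      let s := PySem.Set.ofList elt
      if 2 < PySem.Set.len s ∧ (p.1.any (fun t => PySem.Set.equal s t)) = false then
        (p.1 ++ [s], p.2 ++ [elt])
      else p) (seen, res)
    = (seen ++ (keepSpec pre l).map PySem.Set.ofList, res ++ keepSpec pre l) := by
  induction l with
  | nil => intro pre seen res _; simp [keepSpec]
  | cons e t ih =>
    intro pre seen res hI
    simp only [List.foldl_cons, keepSpec]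
    by_cases hc : 2 < PySem.Set.len (PySem.Set.ofList e) ∧
        (seen.any (fun t => PySem.Set.equal (PySem.Set.ofList e) t)) = false
    · rw [if_pos hc, if_pos ((cond_iff e hI).mp hc)]
      rw [ih (pre ++ [e]) _ _ (inv_step_kept e hI hc.1)]
      simp
    · rw [if_neg hc, if_neg (fun h => hc ((cond_iff e hI).mpr h))]
      rw [ih (pre ++ [e]) _ _ (inv_step_skip e hI hc)]

-- A's second pass computes the kept sets
lemma A_fold2 (l : List (List Int)) : ∀ pre seen, SeenInv seen pre →
    (l.map (fun elt => PySem.Set.ofList elt)).foldl (fun acc elt =>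
      if acc.any (fun t => PySem.Set.equal elt t) then acc
      else if 2 < PySem.Set.len elt then acc ++ [elt] else acc) seen
    = seen ++ (keepSpec pre l).map PySem.Set.ofList := by
  induction l with
  | nil => intro pre seen _; simp [keepSpec]
  | cons e t ih =>
    intro pre seen hI
    simp only [List.map_cons, List.foldl_cons, keepSpec]
    by_cases hc : 2 < PySem.Set.len (PySem.Set.ofList e) ∧
        (seen.any (fun t => PySem.Set.equal (PySem.Set.ofList e) t)) = false
    · rw [hc.2, if_neg (by simp), if_pos hc.1, if_pos ((cond_iff e hI).mp hc)]
      rw [ih (pre ++ [e]) _ (inv_step_kept e hI hc.1)]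
      simp
    · rw [if_neg (fun h => hc ((cond_iff e hI).mpr h))]
      have : (if seen.any (fun t => PySem.Set.equal (PySem.Set.ofList e) t) then seen
          else if 2 < PySem.Set.len (PySem.Set.ofList e) then seen ++ [PySem.Set.ofList e] else seen) = seen := by
        by_cases ha : seen.any (fun t => PySem.Set.equal (PySem.Set.ofList e) t)
        · simp [ha]
        · have h2 : ¬ 2 < PySem.Set.len (PySem.Set.ofList e) := fun h2 =>
            hc ⟨h2, Bool.eq_false_iff.mpr ha⟩
          simp [ha]
          simp only [PySem.Set.len] at h2
          omega
      rw [this, ih (pre ++ [e]) _ (inv_step_skip e hI hc)]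

-- every kept element is the FIRST element of the whole input with its set
lemma keepSpec_find (l : List (List Int)) : ∀ pre e, e ∈ keepSpec pre l →
    (pre ++ l).find? (fun ls => PySem.Set.equal (PySem.Set.ofList e) (PySem.Set.ofList ls)) = some e := by
  induction l with
  | nil => intro pre e h; simp [keepSpec] at h
  | cons a t ih =>
    intro pre e h
    simp only [keepSpec] at h
    by_cases hc : 2 < PySem.Set.len (PySem.Set.ofList a) ∧
        ∀ x ∈ pre, ¬ PySem.Set.equal (PySem.Set.ofList a) (PySem.Set.ofList x) = true
    · rw [if_pos hc] at h
      rcases List.mem_cons.mp h with h | h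
      · subst h
        rw [List.find?_append]
        have hpre : pre.find? (fun ls => PySem.Set.equal (PySem.Set.ofList e) (PySem.Set.ofList ls)) = none :=
          List.find?_eq_none.mpr (fun x hx => by simpa using hc.2 x hx)
        simp [hpre, E_refl]
      · have := ih (pre ++ [a]) e h
        rwa [List.append_assoc, List.singleton_append] at this
    · rw [if_neg hc] at h
      have := ih (pre ++ [a]) e h
      rwa [List.append_assoc, List.singleton_append] at this

-- A's third pass maps each kept set back to its (unique first) list
lemma A_fold3 (total : List (List Int)) (ks : List (List Int))
    (hk : ∀ e ∈ ks, total.find? (fun ls => PySem.Set.equal (PySem.Set.ofList e) (PySem.Set.ofList ls)) = some e) :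
    ∀ acc, (ks.map PySem.Set.ofList).foldl (fun acc elt =>
      match total.find? (fun ls => PySem.Set.equal elt (PySem.Set.ofList ls)) with
      | some ls => acc ++ [ls]
      | none => acc) acc = acc ++ ks := by
  induction ks with
  | nil => intro acc; simp
  | cons e t ih =>
    intro acc
    simp only [List.map_cons, List.foldl_cons]
    rw [hk e (by simp)]
    rw [ih (fun e he => hk e (by simp [he])) (acc ++ [e])]
    simp

-- ===== VERDICT (by name: the statement is the Claim_ definition above) =====
theorem redondance_del_spec : Claim_equal_redondance_del := by
  intro total _
  unfold Spec_redondance_del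
  have hB : redondance_del_alt total = keepSpec [] total := by
    unfold redondance_del_alt
    rw [B_fold total [] [] [] inv_nil]
    simp
  have hA : redondance_del total = keepSpec [] total := by
    unfold redondance_del
    simp only
    rw [A_fold2 total [] [] inv_nil]
    simp only [List.nil_append]
    have := A_fold3 total (keepSpec [] total)
      (fun e he => keepSpec_find total [] e (by simpa using he)) []
    simpa using this
  rw [hA, hB]
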